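-- pv_equiv track=rewrite | github.com/nonemergang/Algos | SecondTest/task_6_tests.py | solve_book_volumes
-- ===== SOURCE A (Python) =====
-- def can_split(max_pages, chapters, kvolume):
--     """
--     Проверяет, можно ли разбить главы на kvolume томов так,
--     чтобы каждый том содержал не более max_pages страниц
--     """
--     volumes = 1
--     current_sum = 0
--
--     for pages in chapters:
--         if pages > max_pages:
--             return False
--         if current_sum + pages <= max_pages:
--             current_sum += pages
--         else:
--             volumes += 1
--             current_sum = pages
--             if volumes > kvolume:
--                 return False
--
--     return volumes <= kvolume
--
-- def solve_book_volumes(n, chapters, kvolume):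
--     """
--     Решает задачу о разбиении романа на тома
--     """
--     left = max(chapters)
--     right = sum(chapters)
--
--     while left < right:
--         mid = (left + right) // 2
--         if can_split(mid, chapters, kvolume):
--             right = mid
--         else:
--             left = mid + 1
--
--     return left
-- ===== SOURCE B (Python) =====
-- def solve_book_volumes(n, chapters, kvolume):
--     m = len(chapters)
--     biggest = max(chapters)  # a volume must hold its largest chapter, so the answer is never below this
--     prefix = [0]
--     for c in chapters:
--         prefix.append(prefix[-1] + c)
--     k = kvolume if kvolume < m else m
--     dp = prefix[:]  # dp[i]: best max-volume size putting the first i chapters into one volume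
--     for _ in range(2, k + 1):
--         ndp = []
--         for i in range(m + 1):
--             best = dp[i]
--             for p in range(i):
--                 cand = dp[p] if dp[p] > prefix[i] - prefix[p] else prefix[i] - prefix[p]
--                 if cand < best:
--                     best = cand
--             ndp.append(best)
--         dp = ndp
--     return dp[m] if dp[m] > biggest else biggest
-- ===== Notes on version B (the rewrite author's own statement) =====
-- stated objective: alternative
-- what changed: A binary-searches the answer, re-running a greedy feasibility scan at each midpoint; B instead builds prefix sums and fills a bottom-up DP table over split points (dp[j][i] = min over p<=i of max(dp[j-1][p], prefix[i]-prefix[p])), finally clamping by the largest chapter, with no search and no feasibility scans.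
-- outside the precondition, e.g. on solve_book_volumes(6, [9, -4, 9, 1, -3, 5], 2): A returns 12, B returns 9
import Mathlib
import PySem

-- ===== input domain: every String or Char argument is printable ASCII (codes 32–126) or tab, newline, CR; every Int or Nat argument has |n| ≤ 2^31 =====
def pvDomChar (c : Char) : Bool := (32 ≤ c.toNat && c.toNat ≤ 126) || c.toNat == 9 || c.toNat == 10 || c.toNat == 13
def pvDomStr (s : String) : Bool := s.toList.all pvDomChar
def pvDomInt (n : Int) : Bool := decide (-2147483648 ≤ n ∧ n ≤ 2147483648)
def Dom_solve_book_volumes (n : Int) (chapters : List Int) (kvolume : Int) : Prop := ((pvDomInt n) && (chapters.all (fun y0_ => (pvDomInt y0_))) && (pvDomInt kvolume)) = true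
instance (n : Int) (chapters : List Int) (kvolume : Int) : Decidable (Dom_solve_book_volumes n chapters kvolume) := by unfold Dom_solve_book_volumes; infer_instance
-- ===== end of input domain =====

-- B replaces A's binary search on the answer (with a greedy feasibility scan) by a
-- bottom-up DP over prefix sums (alternative algorithm, not faster); equivalence is
-- proved on Pre_ (nonempty chapters that are all nonnegative, or kvolume ≤ 1, or a
-- single chapter).

-- ===== PORT A =====
-- can_split's loop with early returns, as structural recursion over the chapter list
def canSplitAux (maxPages kvolume : Int) : List Int → Int → Int → Bool
  | [], volumes, _cur => volumes ≤ kvolume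
  | pages :: rest, volumes, cur =>
    if pages > maxPages then false
    else if cur + pages ≤ maxPages then canSplitAux maxPages kvolume rest volumes (cur + pages)
    else if volumes + 1 > kvolume then false
    else canSplitAux maxPages kvolume rest (volumes + 1) pages

def can_split (maxPages : Int) (chapters : List Int) (kvolume : Int) : Bool :=
  canSplitAux maxPages kvolume chapters 1 0

-- the while-loop of solve_book_volumes
def bsLoop (chapters : List Int) (kvolume : Int) (left right : Int) : Int :=
  if _h : left < right then
    let mid := PySem.Int.floordiv (left + right) 2
    if can_split mid chapters kvolume then bsLoop chapters kvolume left mid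
    else bsLoop chapters kvolume (mid + 1) right
  else left
termination_by (right - left).toNat
decreasing_by
  · have h1 := PySem.Int.floordiv_two_mid_bounds (le_of_lt _h)
    have h2 : PySem.Int.floordiv (left + right) 2 < right := by
      rw [PySem.Int.floordiv_lt_iff_lt_mul (by omega : (0:Int) < 2)]; omega
    omega
  · have h1 := PySem.Int.floordiv_two_mid_bounds (le_of_lt _h)
    have h2 : PySem.Int.floordiv (left + right) 2 < right := by
      rw [PySem.Int.floordiv_lt_iff_lt_mul (by omega : (0:Int) < 2)]; omega
    omega

def solve_book_volumes (n : Int) (chapters : List Int) (kvolume : Int) : Int :=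
  match PySem.List.max? chapters (fun x => x) with
  | none => 0  -- Python: max([]) raises ValueError; excluded by Pre_
  | some left => bsLoop chapters kvolume left chapters.sum

-- ===== PORT B =====
-- the prefix-sum building loop of Source B (carries prefix[-1] as the accumulator)
def prefixAux : List Int → Int → List Int
  | [], _last => []
  | c :: rest, last => (last + c) :: prefixAux rest (last + c)

-- inner loop of Source B: best over split points p < i, seeded with dp[i]
def dpCell (dp pfx : List Int) (i : Nat) : Int :=
  (List.range i).foldl
    (fun best p =>
      let cand := if dp.getD p 0 > pfx.getD i 0 - pfx.getD p 0 then dp.getD p 0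
                  else pfx.getD i 0 - pfx.getD p 0
      if cand < best then cand else best)
    (dp.getD i 0)

-- one `ndp` row of Source B
def dpRow (dp pfx : List Int) (m : Nat) : List Int := (List.range (m + 1)).map (dpCell dp pfx)

def solve_book_volumes_alt (n : Int) (chapters : List Int) (kvolume : Int) : Int :=
  match PySem.List.max? chapters (fun x => x) with
  | none => 0  -- Python: max(chapters) raises ValueError; excluded by Pre_
  | some biggest =>
    let m := chapters.length
    let pfx : List Int := 0 :: prefixAux chapters 0
    let k : Int := if kvolume < (m : Int) then kvolume else (m : Int)
    let dp := (PySem.List.pyRange 2 (k + 1) 1).foldl (fun dp _ => dpRow dp pfx m) pfx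
    let ans := dp.getD m 0
    if ans > biggest then ans else biggest

-- ===== PRECONDITION & SPEC =====
-- Pre_ excludes the empty list (Python A raises ValueError in max(chapters)) and restricts
-- to the task's natural domain of nonnegative page counts when kvolume ≥ 2 and there are
-- two or more chapters (the kvolume ≤ 1 and single-chapter cases are proved for all
-- integers): on negative page counts the greedy feasibility test is not monotone in the
-- page bound, and the two algorithms may legitimately return different values.
def Pre_solve_book_volumes (n : Int) (chapters : List Int) (kvolume : Int) : Prop :=
  chapters ≠ [] ∧ (chapters.length = 1 ∨ kvolume ≤ 1 ∨ ∀ c ∈ chapters, 0 ≤ c)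
instance (n : Int) (chapters : List Int) (kvolume : Int) : Decidable (Pre_solve_book_volumes n chapters kvolume) := by
  unfold Pre_solve_book_volumes; infer_instance

def pvWitness_solve_book_volumes : Int × List Int × Int := (3, ([1, 2, 3], 2))

def Spec_solve_book_volumes (n : Int) (chapters : List Int) (kvolume : Int) (out : Int) : Prop := out = solve_book_volumes_alt n chapters kvolume
instance (n : Int) (chapters : List Int) (kvolume : Int) (out : Int) : Decidable (Spec_solve_book_volumes n chapters kvolume out) := by unfold Spec_solve_book_volumes; infer_instance

-- ===== CLAIM (what is proved, stated in full; the proofs are below) =====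
def Claim_equal_solve_book_volumes : Prop := ∀ (n : Int) (chapters : List Int) (kvolume : Int), Dom_solve_book_volumes n chapters kvolume → Pre_solve_book_volumes n chapters kvolume → Spec_solve_book_volumes n chapters kvolume (solve_book_volumes n chapters kvolume)

-- ===== LEMMAS AND PROOFS =====

-- `PartF m j s`: s splits into j (possibly empty) consecutive blocks, each of sum ≤ m.
def PartF (m : Int) : Nat → List Int → Prop
  | 0, s => s = []
  | j + 1, s => ∃ a b : List Int, s = a ++ b ∧ a.sum ≤ m ∧ PartF m j b

theorem F_nil (m : Int) (hm : 0 ≤ m) (j : Nat) : PartF m j [] := by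
  induction j with
  | zero => rfl
  | succ j ih => exact ⟨[], [], rfl, by simpa using hm, ih⟩

theorem F_mono_m {m m' : Int} {j : Nat} {s : List Int} (h : PartF m j s) (hmm : m ≤ m') :
    PartF m' j s := by
  induction j generalizing s with
  | zero => exact h
  | succ j ih =>
    obtain ⟨a, b, rfl, ha, hb⟩ := h
    exact ⟨a, b, rfl, le_trans ha hmm, ih hb⟩

theorem F_succ {m : Int} (hm : 0 ≤ m) {j : Nat} {s : List Int} (h : PartF m j s) :
    PartF m (j + 1) s := ⟨[], s, rfl, by simpa using hm, h⟩

theorem F_mono_j {m : Int} (hm : 0 ≤ m) {j j' : Nat} (hj : j ≤ j') {s : List Int}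
    (h : PartF m j s) : PartF m j' s := by
  induction j', hj using Nat.le_induction with
  | base => exact h
  | succ _ _ ih => exact F_succ hm ih

theorem F_single {m : Int} {s : List Int} : PartF m 1 s ↔ s.sum ≤ m := by
  constructor
  · rintro ⟨a, b, rfl, ha, hb⟩
    have : b = [] := hb
    subst this; simpa using ha
  · intro h; exact ⟨s, [], by simp, h, rfl⟩

theorem F_whole {m : Int} {s : List Int} {j : Nat} (hm : 0 ≤ m) (hs : s.sum ≤ m)
    (hj : 1 ≤ j) : PartF m j s :=
  F_mono_j hm hj (F_single.mpr hs)

theorem F_elem_le {m : Int} {j : Nat} {s : List Int} (hnn : ∀ x ∈ s, 0 ≤ x)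
    (h : PartF m j s) : ∀ x ∈ s, x ≤ m := by
  induction j generalizing s with
  | zero => subst h; simp
  | succ j ih =>
    obtain ⟨a, b, rfl, ha, hb⟩ := h
    intro x hx
    rcases List.mem_append.mp hx with hxa | hxb
    · calc x ≤ a.sum := List.single_le_sum (fun y hy => hnn y (List.mem_append.mpr (Or.inl hy))) x hxa
        _ ≤ m := ha
    · exact ih (fun y hy => hnn y (List.mem_append.mpr (Or.inr hy))) hb x hxb

theorem F_nonneg_val {m : Int} {j : Nat} {s : List Int} (hnn : ∀ x ∈ s, 0 ≤ x)
    (h : PartF m (j + 1) s) : 0 ≤ m := by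
  obtain ⟨a, b, rfl, ha, _⟩ := h
  have : 0 ≤ a.sum := List.sum_nonneg (fun x hx => hnn x (List.mem_append.mpr (Or.inl hx)))
  omega

theorem suffix_append_cases {α : Type} : ∀ (a b s' : List α), s' <:+ a ++ b →
    s' <:+ b ∨ ∃ a', a' <:+ a ∧ s' = a' ++ b := by
  intro a
  induction a with
  | nil => intro b s' h; exact Or.inl (by simpa using h)
  | cons x a iha =>
    intro b s' h
    rcases List.suffix_cons_iff.mp h with h1 | h2
    · exact Or.inr ⟨x :: a, List.suffix_refl _, h1⟩
    · rcases iha b s' h2 with h3 | ⟨a', h4, h5⟩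
      · exact Or.inl h3
      · exact Or.inr ⟨a', h4.trans (List.suffix_cons _ _), h5⟩

theorem F_suffix {m : Int} {j : Nat} {s s' : List Int} (hnn : ∀ x ∈ s, 0 ≤ x)
    (hsuf : s' <:+ s) (h : PartF m j s) : PartF m j s' := by
  induction j generalizing s s' with
  | zero =>
    subst h
    simpa using List.suffix_nil.mp hsuf |>.symm ▸ rfl
  | succ j ih =>
    obtain ⟨a, b, rfl, ha, hb⟩ := h
    rcases suffix_append_cases a b s' hsuf with hb' | ⟨a', ha', rfl⟩
    · have hnb : ∀ x ∈ b, 0 ≤ x := fun x hx => hnn x (List.mem_append.mpr (Or.inr hx))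
      have hm : 0 ≤ m := le_trans (List.sum_nonneg fun x hx => hnn x (List.mem_append.mpr (Or.inl hx))) ha
      exact F_succ hm (ih hnb hb' hb)
    · refine ⟨a', b, rfl, ?_, hb⟩
      obtain ⟨c, rfl⟩ := ha'
      have : 0 ≤ c.sum := List.sum_nonneg fun x hx => hnn x (by simp [hx])
      have := List.sum_append (l₁ := c) (l₂ := a')
      simp [List.sum_append] at ha ⊢
      omega

theorem F_strip {m : Int} {j : Nat} {p : Int} {rest : List Int}
    (h : PartF m j (p :: rest)) :
    ∃ (a' b2 : List Int) (j2 : Nat), rest = a' ++ b2 ∧ p + a'.sum ≤ m ∧ PartF m j2 b2 ∧ j2 + 1 ≤ j := by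
  induction j with
  | zero => exact absurd h (by simp [PartF])
  | succ j ih =>
    obtain ⟨a, b, hab, ha, hb⟩ := h
    cases a with
    | nil =>
      simp at hab; subst hab
      obtain ⟨a', b2, j2, h1, h2, h3, h4⟩ := ih hb
      exact ⟨a', b2, j2, h1, h2, h3, by omega⟩
    | cons q a2 =>
      simp at hab
      obtain ⟨rfl, rfl⟩ := hab
      refine ⟨a2, b, j, rfl, by simpa using ha, hb, le_refl _⟩

theorem F_snoc {m : Int} {j : Nat} {a b : List Int} (ha : PartF m j a) (hb : b.sum ≤ m) :
    PartF m (j + 1) (a ++ b) := by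
  induction j generalizing a with
  | zero => subst ha; exact ⟨b, [], by simp, hb, rfl⟩
  | succ j ih =>
    obtain ⟨x, y, rfl, hx, hy⟩ := ha
    exact ⟨x, y ++ b, by simp, hx, ih hy⟩

theorem F_unsnoc {m : Int} {j : Nat} {s : List Int} (h : PartF m (j + 1) s) :
    ∃ a b : List Int, s = a ++ b ∧ PartF m j a ∧ b.sum ≤ m := by
  induction j generalizing s with
  | zero =>
    obtain ⟨a, b, rfl, ha, hb⟩ := h
    have : b = [] := hb
    subst this
    exact ⟨[], a, by simp, rfl, by simpa using ha⟩
  | succ j ih =>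
    obtain ⟨x, y, rfl, hx, hy⟩ := h
    obtain ⟨a, b, rfl, ha, hb⟩ := ih hy
    exact ⟨x ++ a, b, by simp, ⟨x, a, rfl, hx, ha⟩, hb⟩

theorem F_singletons {m : Int} {s : List Int} (h : ∀ x ∈ s, x ≤ m) (hnn : ∀ x ∈ s, 0 ≤ x) :
    PartF m s.length s := by
  induction s with
  | nil => rfl
  | cons x t ih =>
    exact ⟨[x], t, rfl, by simpa using h x (by simp),
      ih (fun y hy => h y (by simp [hy])) (fun y hy => hnn y (by simp [hy]))⟩

-- ---- greedy (canSplitAux) vs PartF ----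

theorem greedy_sound {m k : Int} : ∀ (l : List Int) (v c : Int), (∀ x ∈ l, 0 ≤ x) →
    0 ≤ c → c ≤ m → 1 ≤ v → canSplitAux m k l v c = true →
    ∃ a b : List Int, l = a ++ b ∧ c + a.sum ≤ m ∧ PartF m (k - v).toNat b := by
  intro l
  induction l with
  | nil =>
    intro v c _ hc hcm _ _
    exact ⟨[], [], rfl, by simpa using hcm, F_nil m (by omega) _⟩
  | cons p rest ih =>
    intro v c hnn hc hcm hv hrun
    unfold canSplitAux at hrun
    split at hrun
    · exact absurd hrun (by simp)
    · rename_i hpm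
      split at hrun
      · rename_i hca
        obtain ⟨a, b, rfl, ha, hb⟩ := ih v (c + p) (fun x hx => hnn x (by simp [hx]))
          (by have := hnn p (by simp); omega) hca hv hrun
        exact ⟨p :: a, b, rfl, by simpa [add_assoc] using ha, hb⟩
      · split at hrun
        · exact absurd hrun (by simp)
        · rename_i hvk
          have hp0 : 0 ≤ p := hnn p (by simp)
          obtain ⟨a, b, rfl, ha, hb⟩ := ih (v + 1) p (fun x hx => hnn x (by simp [hx]))
            hp0 (by omega) (by omega) hrun
          refine ⟨[], p :: (a ++ b), by simp, by simpa using hcm, ?_⟩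
          have : (k - v).toNat = (k - (v + 1)).toNat + 1 := by omega
          rw [this]
          exact ⟨p :: a, b, by simp, by simpa [add_comm] using ha, hb⟩

theorem greedy_complete {m k : Int} : ∀ (l a b : List Int) (v c : Int) (j : Nat),
    (∀ x ∈ l, 0 ≤ x) → 0 ≤ c → l = a ++ b → c + a.sum ≤ m → PartF m j b →
    1 ≤ v → v + (j : Int) ≤ k → canSplitAux m k l v c = true := by
  intro l
  induction l with
  | nil =>
    intro a b v c j _ _ _ _ _ hv hvk
    unfold canSplitAux
    simp only [decide_eq_true_eq]
    omega
  | cons p rest ih =>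
    intro a b v c j hnn hc hab hsum hb hv hvk
    have hp0 : 0 ≤ p := hnn p (by simp)
    cases a with
    | cons q a2 =>
      simp at hab
      obtain ⟨rfl, rfl⟩ := hab
      have ha2 : 0 ≤ a2.sum := List.sum_nonneg fun x hx => hnn x (by simp [hx])
      rw [List.sum_cons] at hsum
      have hcp : c + p ≤ m := by omega
      unfold canSplitAux
      rw [if_neg (by omega), if_pos hcp]
      exact ih a2 b v (c + p) j (fun x hx => hnn x (by simp [hx])) (by omega) rfl
        (by omega) hb hv hvk
    | nil =>
      simp at hab
      subst hab
      obtain ⟨a', b2, j2, h1, h2, h3, h4⟩ := F_strip hb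
      have hpm : p ≤ m := by
        have : 0 ≤ a'.sum := List.sum_nonneg fun x hx => hnn x (by simp [h1, hx])
        omega
      unfold canSplitAux
      rw [if_neg (by omega)]
      by_cases hcp : c + p ≤ m
      · rw [if_pos hcp]
        have hrest : PartF m j rest := F_suffix hnn (List.suffix_cons p rest) hb
        exact ih [] rest v (c + p) j (fun x hx => hnn x (by simp [hx])) (by omega)
          (by simp) (by simpa using hcp) hrest hv hvk
      · rw [if_neg hcp, if_neg (by push_neg; omega)]
        exact ih a' b2 (v + 1) p j2 (fun x hx => hnn x (by simp [hx])) hp0 h1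
          (by omega) h3 (by omega) (by omega)

theorem can_split_imp_F {m k : Int} {ch : List Int} (hnn : ∀ x ∈ ch, 0 ≤ x) (hm : 0 ≤ m)
    (hk : 1 ≤ k) (h : can_split m ch k = true) : PartF m k.toNat ch := by
  obtain ⟨a, b, rfl, ha, hb⟩ := greedy_sound (m := m) (k := k) ch 1 0 hnn le_rfl hm le_rfl h
  have : k.toNat = (k - 1).toNat + 1 := by omega
  rw [this]
  exact ⟨a, b, rfl, by simpa using ha, hb⟩

theorem F_imp_can_split {m k : Int} {ch : List Int} (hnn : ∀ x ∈ ch, 0 ≤ x) (hm : 0 ≤ m)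
    (hk : 1 ≤ k) (h : PartF m k.toNat ch) : can_split m ch k = true := by
  have hkt : k.toNat = (k.toNat - 1) + 1 := by omega
  rw [hkt] at h
  obtain ⟨a, b, rfl, ha, hb⟩ := h
  exact greedy_complete (m := m) (k := k) (a ++ b) a b 1 0 (k.toNat - 1) hnn le_rfl rfl
    (by simpa using ha) hb le_rfl (by omega)

theorem can_split_nonneg_m {m k : Int} {p : Int} {rest : List Int}
    (hnn : ∀ x ∈ (p :: rest), 0 ≤ x) (h : can_split m (p :: rest) k = true) : 0 ≤ m := by
  unfold can_split canSplitAux at h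
  split at h
  · exact absurd h (by simp)
  · have := hnn p (by simp); omega

theorem can_split_mono {k : Int} {ch : List Int} (hne : ch ≠ [])
    (hnn : ∀ x ∈ ch, 0 ≤ x) (hk : 1 ≤ k) :
    ∀ a b : Int, a ≤ b → can_split a ch k = true → can_split b ch k = true := by
  intro a b hab h
  obtain ⟨p, rest, rfl⟩ := List.exists_cons_of_ne_nil hne
  have ha0 : 0 ≤ a := can_split_nonneg_m hnn h
  exact F_imp_can_split hnn (by omega) hk (F_mono_m (can_split_imp_F hnn ha0 hk h) hab)

-- ---- binary search ----

theorem bsLoop_stop {ch : List Int} {k l r : Int} (h : ¬ l < r) : bsLoop ch k l r = l := by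
  rw [bsLoop]; simp [h]

theorem bs_exact {ch : List Int} {k : Int}
    (mono : ∀ a b : Int, a ≤ b → can_split a ch k = true → can_split b ch k = true) :
    ∀ l r V : Int, l ≤ r → l ≤ V → V ≤ r →
    (∀ y, l ≤ y → y < V → can_split y ch k = false) →
    (can_split V ch k = true ∨ V = r) → bsLoop ch k l r = V := by
  intro l r
  induction l, r using bsLoop.induct ch k with
  | case1 l r hlt mid hcs ih =>
    intro V hlr hlV hVr hbelow hat
    rw [bsLoop]
    simp only [dif_pos hlt]
    have hmid := PySem.Int.floordiv_two_mid_bounds (le_of_lt hlt)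
    have hmidr : PySem.Int.floordiv (l + r) 2 < r := by
      rw [PySem.Int.floordiv_lt_iff_lt_mul (by omega : (0:Int) < 2)]; omega
    rw [if_pos hcs]
    have hVmid : V ≤ mid := by
      by_contra hgt
      rw [Int.not_le] at hgt
      have := hbelow mid (by omega) (by omega)
      rw [hcs] at this; exact absurd this (by simp)
    refine ih V (by omega) hlV hVmid hbelow ?_
    rcases hat with h | rfl
    · exact Or.inl h
    · exact absurd hVmid (by omega)
  | case2 l r hlt mid hcs ih =>
    intro V hlr hlV hVr hbelow hat
    rw [bsLoop]
    simp only [dif_pos hlt]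
    have hmid := PySem.Int.floordiv_two_mid_bounds (le_of_lt hlt)
    have hmidr : PySem.Int.floordiv (l + r) 2 < r := by
      rw [PySem.Int.floordiv_lt_iff_lt_mul (by omega : (0:Int) < 2)]; omega
    rw [if_neg hcs]
    have hVmid : mid + 1 ≤ V := by
      by_contra hgt
      rw [Int.not_le] at hgt
      rcases hat with h | rfl
      · exact hcs (mono V mid (by omega) h)
      · omega
    exact ih V (by omega) hVmid hVr (fun y h1 h2 => hbelow y (by omega) h2) hat
  | case3 l r hlt =>
    intro V hlr hlV hVr _ _
    rw [bsLoop]; simp only [dif_neg hlt]; omega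

theorem csa_false_of_k_nonpos {m k : Int} (hk : k ≤ 0) :
    ∀ (l : List Int) (v c : Int), 1 ≤ v → canSplitAux m k l v c = false := by
  intro l
  induction l with
  | nil => intro v c hv; unfold canSplitAux; simp; omega
  | cons p rest ih =>
    intro v c hv
    unfold canSplitAux
    split
    · rfl
    · split
      · exact ih v (c + p) hv
      · rw [if_pos (by omega)]

theorem bsLoop_allfalse {ch : List Int} {k : Int}
    (hP : ∀ m, can_split m ch k = false) :
    ∀ l r : Int, l ≤ r → bsLoop ch k l r = r := by
  intro l r
  induction l, r using bsLoop.induct ch k with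
  | case1 l r hlt mid hcs ih =>
    intro _; rw [hP mid] at hcs; exact absurd hcs (by simp)
  | case2 l r hlt mid hcs ih =>
    intro _
    rw [bsLoop]
    simp only [dif_pos hlt]
    rw [if_neg hcs]
    have hmid := PySem.Int.floordiv_two_mid_bounds (le_of_lt hlt)
    have hmidr : PySem.Int.floordiv (l + r) 2 < r := by
      rw [PySem.Int.floordiv_lt_iff_lt_mul (by omega : (0:Int) < 2)]; omega
    exact ih (by omega)
  | case3 l r hlt =>
    intro hlr; rw [bsLoop]; simp only [dif_neg hlt]; omega

-- ---- prefix sums ----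

theorem prefixAux_getD : ∀ (l : List Int) (c : Int) (i : Nat), i < l.length →
    (prefixAux l c).getD i 0 = c + (l.take (i + 1)).sum := by
  intro l
  induction l with
  | nil => intro c i h; simp at h
  | cons x t ih =>
    intro c i h
    cases i with
    | zero => simp [prefixAux]
    | succ i =>
      simp only [prefixAux, List.getD_cons_succ, List.take_succ_cons, List.sum_cons]
      rw [ih (c + x) i (by simpa using h)]
      ring

theorem pfx_getD {ch : List Int} {i : Nat} (h : i ≤ ch.length) :
    (0 :: prefixAux ch 0).getD i 0 = (ch.take i).sum := by
  cases i with
  | zero => simp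
  | succ i =>
    simp only [List.getD_cons_succ]
    rw [prefixAux_getD ch 0 i (by omega)]
    ring

-- ---- fold-min helpers ----

theorem foldmin_le_init (f : Nat → Int) : ∀ (ps : List Nat) (b : Int),
    ps.foldl (fun best p => if f p < best then f p else best) b ≤ b := by
  intro ps
  induction ps with
  | nil => simp
  | cons p t ih =>
    intro b
    simp only [List.foldl_cons]
    split
    · exact le_trans (ih _) (by omega)
    · exact ih b

theorem foldmin_le_elem (f : Nat → Int) : ∀ (ps : List Nat) (b : Int) (p : Nat), p ∈ ps →
    ps.foldl (fun best p => if f p < best then f p else best) b ≤ f p := by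
  intro ps
  induction ps with
  | nil => simp
  | cons q t ih =>
    intro b p hp
    simp only [List.foldl_cons]
    rcases List.mem_cons.mp hp with rfl | hp'
    · split
      · exact le_trans (foldmin_le_init f t _) (by omega)
      · exact le_trans (foldmin_le_init f t _) (by omega)
    · exact ih _ p hp'

theorem foldmin_mem (f : Nat → Int) : ∀ (ps : List Nat) (b : Int),
    ps.foldl (fun best p => if f p < best then f p else best) b = b ∨
    ∃ p ∈ ps, ps.foldl (fun best p => if f p < best then f p else best) b = f p := by
  intro ps
  induction ps with
  | nil => intro b; exact Or.inl rfl
  | cons q t ih =>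
    intro b
    simp only [List.foldl_cons]
    split
    · rcases ih (f q) with h | ⟨p, hp, h⟩
      · exact Or.inr ⟨q, by simp, h⟩
      · exact Or.inr ⟨p, by simp [hp], h⟩
    · rcases ih b with h | ⟨p, hp, h⟩
      · exact Or.inl h
      · exact Or.inr ⟨p, by simp [hp], h⟩

-- ---- DP rows ----

def RowOK (ch : List Int) (j : Nat) (dp : List Int) : Prop :=
  dp.length = ch.length + 1 ∧
  ∀ i : Nat, i ≤ ch.length →
    PartF (dp.getD i 0) j (ch.take i) ∧ (∀ mm : Int, PartF mm j (ch.take i) → dp.getD i 0 ≤ mm)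

theorem prefixAux_length : ∀ (l : List Int) (c : Int), (prefixAux l c).length = l.length := by
  intro l
  induction l with
  | nil => intro c; rfl
  | cons x t ih => intro c; simp [prefixAux, ih]

theorem row_base {ch : List Int} (hnn : ∀ x ∈ ch, 0 ≤ x) :
    RowOK ch 1 (0 :: prefixAux ch 0) := by
  constructor
  · simp [prefixAux_length]
  · intro i hi
    rw [pfx_getD hi]
    exact ⟨F_single.mpr le_rfl, fun mm h => F_single.mp h⟩

theorem getD_map_range {f : Nat → Int} {mm i : Nat} (h : i < mm) :
    ((List.range mm).map f).getD i 0 = f i := by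
  rw [List.getD_eq_getElem _ _ (by simpa using h)]
  simp

theorem row_step {ch : List Int} (hnn : ∀ x ∈ ch, 0 ≤ x) {j : Nat} (hj : 1 ≤ j)
    {dp : List Int} (h : RowOK ch j dp) :
    RowOK ch (j + 1) (dpRow dp (0 :: prefixAux ch 0) ch.length) := by
  obtain ⟨hlen, hrow⟩ := h
  refine ⟨by simp [dpRow], ?_⟩
  intro i hi
  have hcell : (dpRow dp (0 :: prefixAux ch 0) ch.length).getD i 0
      = dpCell dp (0 :: prefixAux ch 0) i := getD_map_range (by omega)
  rw [hcell]
  have hnn' : ∀ x ∈ ch.take i, 0 ≤ x := fun x hx => hnn x (List.mem_of_mem_take hx)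
  -- the candidate function of the inner fold
  have hcd : dpCell dp (0 :: prefixAux ch 0) i
      = (List.range i).foldl
          (fun best p =>
            if (fun q => if dp.getD q 0 > (0 :: prefixAux ch 0).getD i 0 - (0 :: prefixAux ch 0).getD q 0
                         then dp.getD q 0
                         else (0 :: prefixAux ch 0).getD i 0 - (0 :: prefixAux ch 0).getD q 0) p < best
            then (fun q => if dp.getD q 0 > (0 :: prefixAux ch 0).getD i 0 - (0 :: prefixAux ch 0).getD q 0
                           then dp.getD q 0
                           else (0 :: prefixAux ch 0).getD i 0 - (0 :: prefixAux ch 0).getD q 0) p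
            else best)
          (dp.getD i 0) := rfl
  set f : Nat → Int := fun q =>
    if dp.getD q 0 > (0 :: prefixAux ch 0).getD i 0 - (0 :: prefixAux ch 0).getD q 0
    then dp.getD q 0
    else (0 :: prefixAux ch 0).getD i 0 - (0 :: prefixAux ch 0).getD q 0 with hf
  rw [hcd]
  have hpfxi : (0 :: prefixAux ch 0).getD i 0 = (ch.take i).sum := pfx_getD hi
  have hd0 : 0 ≤ dp.getD i 0 := by
    have hach := (hrow i hi).1
    obtain ⟨j', rfl⟩ : ∃ j', j = j' + 1 := ⟨j - 1, by omega⟩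
    exact F_nonneg_val hnn' hach
  constructor
  · -- achievability of the fold value
    rcases foldmin_mem f (List.range i) (dp.getD i 0) with hres | ⟨p, hp, hres⟩
    · rw [hres]
      exact F_succ hd0 (hrow i hi).1
    · rw [hres]
      have hpi : p < i := List.mem_range.mp hp
      have hfp_dp : dp.getD p 0 ≤ f p := by rw [hf]; dsimp only; split <;> omega
      have hfp_blk : (0 :: prefixAux ch 0).getD i 0 - (0 :: prefixAux ch 0).getD p 0 ≤ f p := by
        rw [hf]; dsimp only; split <;> omega
      have hsplit : ch.take i = ch.take p ++ (ch.take i).drop p := by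
        conv_lhs => rw [← List.take_append_drop p (ch.take i)]
        rw [List.take_take, min_eq_left (le_of_lt hpi)]
      have hpfxp : (0 :: prefixAux ch 0).getD p 0 = (ch.take p).sum := pfx_getD (by omega)
      have hblk : ((ch.take i).drop p).sum
          = (0 :: prefixAux ch 0).getD i 0 - (0 :: prefixAux ch 0).getD p 0 := by
        have h2 : (ch.take p).sum + ((ch.take i).drop p).sum = (ch.take i).sum := by
          conv_rhs => rw [hsplit]
          rw [List.sum_append]
        rw [hpfxi, hpfxp]; omega
      rw [hsplit]
      exact F_snoc (F_mono_m (hrow p (by omega)).1 hfp_dp) (by rw [hblk]; exact hfp_blk)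
  · -- minimality of the fold value
    intro mm hmm
    obtain ⟨a, b, hab, hFa, hsb⟩ := F_unsnoc hmm
    have hlentake : (ch.take i).length = i := by simp; omega
    have hple : a.length ≤ i := by
      have := congrArg List.length hab
      simp only [List.length_append] at this
      omega
    have ha_eq : a = ch.take a.length := by
      have h1 : a = (ch.take i).take a.length := by
        rw [hab, List.take_left]
      conv_lhs => rw [h1]
      rw [List.take_take, min_eq_left hple]
    rcases eq_or_lt_of_le hple with heq | hplt
    · -- the whole list is the first j parts: the fold's seed dp[i] already beats mm
      have hb_nil : b = [] := by
        have := congrArg List.length hab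
        simp only [List.length_append] at this
        rw [hlentake] at this
        have : b.length = 0 := by omega
        exact List.eq_nil_of_length_eq_zero this
      subst hb_nil
      simp only [List.append_nil] at hab
      have : dp.getD i 0 ≤ mm := (hrow i hi).2 mm (by rw [hab]; exact hFa)
      exact le_trans (foldmin_le_init f _ _) this
    · -- split point p = a.length < i
      have hb_eq : b = (ch.take i).drop a.length := by
        rw [hab, List.drop_left]
      have hdpp : dp.getD a.length 0 ≤ mm := (hrow a.length (by omega)).2 mm (ha_eq ▸ hFa)
      have hpfxp : (0 :: prefixAux ch 0).getD a.length 0 = (ch.take a.length).sum :=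
        pfx_getD (by omega)
      have hsplit : ch.take i = ch.take a.length ++ (ch.take i).drop a.length := by
        conv_lhs => rw [← List.take_append_drop a.length (ch.take i)]
        rw [List.take_take, min_eq_left (le_of_lt hplt)]
      have hblk : ((ch.take i).drop a.length).sum
          = (0 :: prefixAux ch 0).getD i 0 - (0 :: prefixAux ch 0).getD a.length 0 := by
        have h2 : (ch.take a.length).sum + ((ch.take i).drop a.length).sum = (ch.take i).sum := by
          conv_rhs => rw [hsplit]
          rw [List.sum_append]
        rw [hpfxi, hpfxp]; omega
      have hsbm : (0 :: prefixAux ch 0).getD i 0 - (0 :: prefixAux ch 0).getD a.length 0 ≤ mm := by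
        rw [← hblk, ← hb_eq]; exact hsb
      have hfp : f a.length ≤ mm := by
        rw [hf]; dsimp only; split <;> omega
      exact le_trans (foldmin_le_elem f _ _ a.length (List.mem_range.mpr hplt)) hfp

theorem rows_iterate {ch : List Int} (hnn : ∀ x ∈ ch, 0 ≤ x) :
    ∀ t : Nat, RowOK ch (t + 1)
      ((fun dp => dpRow dp (0 :: prefixAux ch 0) ch.length)^[t] (0 :: prefixAux ch 0)) := by
  intro t
  induction t with
  | zero => simpa using row_base hnn
  | succ t ih =>
    rw [Function.iterate_succ_apply']
    exact row_step hnn (by omega) ih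

theorem foldl_const_iterate {α β : Type} (g : α → α) : ∀ (l : List β) (x : α),
    l.foldl (fun d _ => g d) x = g^[l.length] x := by
  intro l
  induction l with
  | nil => simp
  | cons y t ih => intro x; simp [List.foldl_cons, ih, Function.iterate_succ_apply]

-- ---- the case lemmas ----

-- kvolume = 1: can_split tracks running sums
def runs : Int → List Int → List Int
  | _, [] => []
  | c, p :: rest => (c + p) :: runs (c + p) rest

theorem csa_one_iff {m : Int} : ∀ (l : List Int) (c : Int),
    canSplitAux m 1 l 1 c = true ↔ (∀ x ∈ l, x ≤ m) ∧ (∀ q ∈ runs c l, q ≤ m) := by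
  intro l
  induction l with
  | nil => intro c; unfold canSplitAux; simp [runs]
  | cons p rest ih =>
    intro c
    unfold canSplitAux
    by_cases h1 : p > m
    · rw [if_pos h1]; simp [runs]; intro h; omega
    · rw [if_neg h1]
      by_cases h2 : c + p ≤ m
      · rw [if_pos h2, ih]
        simp only [runs, List.mem_cons]
        constructor
        · rintro ⟨ha, hb⟩
          exact ⟨fun x hx => by rcases hx with rfl | hx; omega; exact ha x hx,
                 fun q hq => by rcases hq with rfl | hq; omega; exact hb q hq⟩
        · rintro ⟨ha, hb⟩
          exact ⟨fun x hx => ha x (Or.inr hx), fun q hq => hb q (Or.inr hq)⟩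
      · rw [if_neg h2, if_pos (by omega)]
        constructor
        · intro h; exact absurd h (by simp)
        · rintro ⟨-, hb⟩
          exact absurd (hb (c + p) (by simp [runs])) (by omega)

theorem sum_mem_runs : ∀ (l : List Int) (c : Int), l ≠ [] → (c + l.sum) ∈ runs c l := by
  intro l
  induction l with
  | nil => intro c h; exact absurd rfl h
  | cons p rest ih =>
    intro c _
    cases rest with
    | nil => simp [runs]
    | cons q t =>
      have := ih (c + p) (by simp)
      simp only [runs, List.sum_cons, List.mem_cons] at this ⊢
      right
      rcases this with h | h
      · exact Or.inl (by omega)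
      · have hassoc : c + (p + (q + t.sum)) = c + p + (q + t.sum) := by ring
        rw [hassoc]; exact Or.inr h

-- B's value when no DP iteration runs (k ≤ 1 or a single chapter): sum of chapters
theorem ne_nil_of_max?_eq_some {ch : List Int} {mx : Int}
    (hmx : PySem.List.max? ch (fun x => x) = some mx) : ch ≠ [] := by
  intro h
  subst h
  rw [(PySem.List.max?_eq_none_iff [] (fun x => x)).mpr rfl] at hmx
  exact absurd hmx.symm (by simp)

theorem alt_eval {n kv : Int} {ch : List Int} {mx : Int}
    (hmx : PySem.List.max? ch (fun x => x) = some mx) (hk : kv ≤ 1 ∨ ch.length = 1) :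
    solve_book_volumes_alt n ch kv =
      (if ch.sum > mx then ch.sum else mx) := by
  have hm1 : 1 ≤ ch.length := List.length_pos_of_ne_nil (ne_nil_of_max?_eq_some hmx)
  simp only [solve_book_volumes_alt, hmx]
  have hK : (if kv < (ch.length : Int) then kv else (ch.length : Int)) ≤ 1 := by
    rcases hk with hk | hk
    · split <;> omega
    · rw [hk]; split <;> omega
  have hrange : PySem.List.pyRange 2 ((if kv < (ch.length : Int) then kv else (ch.length : Int)) + 1) 1 = [] := by
    rw [PySem.List.pyRange_one]
    have h0 : ((if kv < (ch.length : Int) then kv else (ch.length : Int)) + 1 - 2).toNat = 0 := by omega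
    rw [h0]
    rfl
  rw [hrange]
  simp only [List.foldl_nil]
  rw [pfx_getD le_rfl, List.take_length]

theorem L0 {n kv : Int} {ch : List Int} (hne : ch ≠ []) (hk : kv ≤ 0) :
    solve_book_volumes n ch kv = solve_book_volumes_alt n ch kv := by
  cases hmx : PySem.List.max? ch (fun x => x) with
  | none => exact absurd ((PySem.List.max?_eq_none_iff ch (fun x => x)).mp hmx) hne
  | some mx =>
    rw [alt_eval (n := n) hmx (Or.inl (by omega))]
    simp only [solve_book_volumes, hmx]
    have hfalse : ∀ m, can_split m ch kv = false := fun m =>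
      csa_false_of_k_nonpos hk ch 1 0 le_rfl
    by_cases hlt : mx < ch.sum
    · rw [bsLoop_allfalse hfalse mx ch.sum (le_of_lt hlt), if_pos hlt]
    · rw [bsLoop_stop hlt, if_neg hlt]

theorem L1 {n kv : Int} {ch : List Int} (hne : ch ≠ []) (hk : kv = 1) :
    solve_book_volumes n ch kv = solve_book_volumes_alt n ch kv := by
  subst hk
  cases hmx : PySem.List.max? ch (fun x => x) with
  | none => exact absurd ((PySem.List.max?_eq_none_iff ch (fun x => x)).mp hmx) hne
  | some mx =>
    rw [alt_eval (n := n) hmx (Or.inl le_rfl)]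
    simp only [solve_book_volumes, hmx]
    by_cases hlt : mx < ch.sum
    · have mono1 : ∀ a b : Int, a ≤ b → can_split a ch 1 = true → can_split b ch 1 = true := by
        intro a b hab h
        have h' := (csa_one_iff ch 0).mp h
        exact (csa_one_iff ch 0).mpr
          ⟨fun x hx => le_trans (h'.1 x hx) hab, fun q hq => le_trans (h'.2 q hq) hab⟩
      have hbelow : ∀ y : Int, mx ≤ y → y < ch.sum → can_split y ch 1 = false := by
        intro y _ h2
        apply Bool.eq_false_iff.mpr
        intro hy
        have := ((csa_one_iff ch 0).mp hy).2 (0 + ch.sum) (sum_mem_runs ch 0 hne)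
        omega
      rw [bs_exact mono1 mx ch.sum ch.sum (le_of_lt hlt) (le_of_lt hlt) le_rfl hbelow
        (Or.inr rfl), if_pos hlt]
    · rw [bsLoop_stop hlt, if_neg hlt]

theorem Llen1 {n kv : Int} {ch : List Int} (hlen : ch.length = 1) :
    solve_book_volumes n ch kv = solve_book_volumes_alt n ch kv := by
  obtain ⟨c, rfl⟩ := List.length_eq_one_iff.mp hlen
  have hmx : PySem.List.max? [c] (fun x : Int => x) = some c := by
    rw [PySem.List.max?_id_cons]; rfl
  rw [alt_eval (n := n) (kv := kv) hmx (Or.inr rfl)]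
  simp only [solve_book_volumes, hmx]
  have hsum : ([c] : List Int).sum = c := by simp
  rw [hsum, bsLoop_stop (lt_irrefl c), if_neg (lt_irrefl c)]

theorem Lmain {n kv : Int} {ch : List Int} (hne : ch ≠ []) (hnn : ∀ x ∈ ch, 0 ≤ x)
    (hk : 1 ≤ kv) :
    solve_book_volumes n ch kv = solve_book_volumes_alt n ch kv := by
  cases hmx : PySem.List.max? ch (fun x => x) with
  | none => exact absurd ((PySem.List.max?_eq_none_iff ch (fun x => x)).mp hmx) hne
  | some mx =>
    have hm1 : 1 ≤ ch.length := List.length_pos_of_ne_nil hne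
    simp only [solve_book_volumes, solve_book_volumes_alt, hmx]
    set K : Int := if kv < (ch.length : Int) then kv else (ch.length : Int) with hKdef
    have hK1 : 1 ≤ K := by rw [hKdef]; split <;> omega
    have hKkv : K ≤ kv := by rw [hKdef]; split <;> omega
    have hfold : (PySem.List.pyRange 2 (K + 1) 1).foldl
        (fun dp _ => dpRow dp (0 :: prefixAux ch 0) ch.length) (0 :: prefixAux ch 0)
        = (fun dp => dpRow dp (0 :: prefixAux ch 0) ch.length)^[(K - 1).toNat]
            (0 :: prefixAux ch 0) := by
      rw [PySem.List.pyRange_one, foldl_const_iterate]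
      have h1 : K + 1 - 2 = K - 1 := by ring
      rw [h1, List.length_map, List.length_range]
    rw [hfold]
    obtain ⟨hlenfin, hprop⟩ := rows_iterate hnn (K - 1).toNat
    have hKt : (K - 1).toNat + 1 = K.toNat := by omega
    rw [hKt] at hprop
    have hpair := hprop ch.length le_rfl
    rw [List.take_length] at hpair
    obtain ⟨hach, hmin⟩ := hpair
    set V := ((fun dp => dpRow dp (0 :: prefixAux ch 0) ch.length)^[(K - 1).toNat]
      (0 :: prefixAux ch 0)).getD ch.length 0 with hV
    have hmem : mx ∈ ch := PySem.List.max?_mem hmx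
    have hmx0 : 0 ≤ mx := hnn mx hmem
    have hmxV : mx ≤ V := F_elem_le hnn hach mx hmem
    have hVS : V ≤ ch.sum := hmin ch.sum (F_whole (List.sum_nonneg hnn) le_rfl (by omega))
    have hmxS : mx ≤ ch.sum := List.single_le_sum hnn mx hmem
    have hcsV : can_split V ch kv = true := by
      refine F_imp_can_split hnn (by omega) hk (F_mono_j (by omega) (by omega) hach)
    have hbelow : ∀ y : Int, mx ≤ y → y < V → can_split y ch kv = false := by
      intro y h1 h2
      apply Bool.eq_false_iff.mpr
      intro hy
      have hFy : PartF y kv.toNat ch := can_split_imp_F hnn (by omega) hk hy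
      have hFyK : PartF y K.toNat ch := by
        by_cases hc : kv < (ch.length : Int)
        · have hKeq : K = kv := by rw [hKdef, if_pos hc]
          rw [hKeq]; exact hFy
        · have hKeq : K = (ch.length : Int) := by rw [hKdef, if_neg hc]
          have hel : ∀ x ∈ ch, x ≤ y := F_elem_le hnn hFy
          have hs := F_singletons hel hnn
          rw [hKeq, Int.toNat_natCast]
          exact hs
      have := hmin y hFyK
      omega
    rw [bs_exact (can_split_mono hne hnn hk) mx ch.sum V hmxS hmxV hVS hbelow (Or.inl hcsV)]
    split <;> omega

-- ===== VERDICT (by name: the statement is the Claim_ definition above) =====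
theorem solve_book_volumes_spec : Claim_equal_solve_book_volumes := by
  intro n ch kv _hdom hpre
  obtain ⟨hne, hcase⟩ := hpre
  unfold Spec_solve_book_volumes
  rcases hcase with hlen | hk1 | hnn
  · exact Llen1 (n := n) (kv := kv) hlen
  · rcases Int.lt_or_le kv 1 with h | h
    · exact L0 (n := n) (kv := kv) hne (by omega)
    · exact L1 (n := n) (kv := kv) hne (by omega)
  · rcases Int.lt_or_le 0 kv with h | h
    · exact Lmain (n := n) (kv := kv) hne hnn (by omega)
    · exact L0 (n := n) (kv := kv) hne (by omega)
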